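-- pv_equiv track=rewrite | github.com/ultracoldYEG/cycle-control | CycleControl/cycle_plotter.py | prepare_sample_plot_data
-- ===== SOURCE A (Python) =====
-- def prepare_sample_plot_data(domain, data):
--     new_domain = []
--     new_data = []
--     for i in range(1, len(domain)):
--         new_domain.append(domain[i - 1])
--         new_data.append(data[i - 1])
--
--         new_domain.append(domain[i])
--         new_data.append(data[i - 1])
--
--     new_domain.append(domain[-1])
--     new_data.append(data[-1])
--
--     return new_domain, new_data
-- ===== SOURCE B (Python) =====
-- def prepare_sample_plot_data(domain, data):
--     n = len(domain)
--     new_domain = [domain[(k + 1) // 2] for k in range(2 * n - 1)]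
--     new_data = [data[k // 2] for k in range(2 * n - 2)]
--     new_data.append(data[-1])
--     return new_domain, new_data
-- ===== Notes on version B (the rewrite author's own statement) =====
-- stated objective: alternative
-- what changed: B computes each output position directly by a closed-form index map (new_domain[k] = domain[(k+1)//2], new_data[k] = data[k//2], then the final data[-1]) over range(2n-1)/range(2n-2), instead of A's loop over adjacent index pairs that interleaves two appends per step.
import Mathlib
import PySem

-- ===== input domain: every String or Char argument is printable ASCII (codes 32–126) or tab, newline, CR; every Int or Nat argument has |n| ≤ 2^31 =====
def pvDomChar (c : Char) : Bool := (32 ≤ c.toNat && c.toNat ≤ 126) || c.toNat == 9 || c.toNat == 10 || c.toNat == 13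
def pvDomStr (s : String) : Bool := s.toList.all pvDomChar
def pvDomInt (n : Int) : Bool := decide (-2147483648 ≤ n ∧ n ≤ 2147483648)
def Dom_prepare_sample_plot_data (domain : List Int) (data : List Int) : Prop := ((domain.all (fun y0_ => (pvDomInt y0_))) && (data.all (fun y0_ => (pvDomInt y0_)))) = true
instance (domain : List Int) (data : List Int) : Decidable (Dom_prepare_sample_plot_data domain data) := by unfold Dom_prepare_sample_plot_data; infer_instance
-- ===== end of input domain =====

-- B computes each output position by a closed-form index map instead of A's adjacent-pair loop (objective: alternative).

-- ===== PORT A =====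
-- Literal port of A: loop over range(1, len(domain)) appending domain[i-1], domain[i]
-- and data[i-1] twice, then the final domain[-1] / data[-1].
def prepare_sample_plot_data (domain : List Int) (data : List Int) : List Int × List Int :=
  let s := (PySem.List.pyRange 1 (domain.length : Int) 1).foldl
    (fun (st : List Int × List Int) i =>
      (st.1 ++ [PySem.List.pyGetD domain (i - 1) 0, PySem.List.pyGetD domain i 0],
       st.2 ++ [PySem.List.pyGetD data (i - 1) 0, PySem.List.pyGetD data (i - 1) 0]))
    ([], [])
  (s.1 ++ [PySem.List.pyGetD domain (-1) 0], s.2 ++ [PySem.List.pyGetD data (-1) 0])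

-- ===== PORT B =====
-- Literal port of B: new_domain[k] = domain[(k+1)//2] for k in range(2n-1);
-- new_data[k] = data[k//2] for k in range(2n-2); then append data[-1].
def prepare_sample_plot_data_alt (domain : List Int) (data : List Int) : List Int × List Int :=
  let n : Int := domain.length
  let new_domain := (PySem.List.pyRange 0 (2 * n - 1) 1).map
    (fun k => PySem.List.pyGetD domain (PySem.Int.floordiv (k + 1) 2) 0)
  let new_data := (PySem.List.pyRange 0 (2 * n - 2) 1).map
    (fun k => PySem.List.pyGetD data (PySem.Int.floordiv k 2) 0)
  (new_domain, new_data ++ [PySem.List.pyGetD data (-1) 0])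

-- ===== PRECONDITION & SPEC =====
-- A raises IndexError when domain is empty (domain[-1]), data is empty (data[-1]),
-- or data has fewer than len(domain)-1 elements (data[i-1] in the loop); Pre_ excludes exactly those.
def Pre_prepare_sample_plot_data (domain : List Int) (data : List Int) : Prop :=
  domain ≠ [] ∧ data ≠ [] ∧ domain.length ≤ data.length + 1
instance (domain : List Int) (data : List Int) : Decidable (Pre_prepare_sample_plot_data domain data) := by unfold Pre_prepare_sample_plot_data; infer_instance

def pvWitness_prepare_sample_plot_data : List Int × List Int := ([1, 3, 7], [10, 20, 30])

def Spec_prepare_sample_plot_data (domain : List Int) (data : List Int) (out : List Int × List Int) : Prop := out = prepare_sample_plot_data_alt domain data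
instance (domain : List Int) (data : List Int) (out : List Int × List Int) : Decidable (Spec_prepare_sample_plot_data domain data out) := by unfold Spec_prepare_sample_plot_data; infer_instance

-- ===== CLAIM =====
def Claim_equal_prepare_sample_plot_data : Prop := ∀ (domain : List Int) (data : List Int), Dom_prepare_sample_plot_data domain data → Pre_prepare_sample_plot_data domain data → Spec_prepare_sample_plot_data domain data (prepare_sample_plot_data domain data)

-- ===== LEMMAS AND PROOFS =====

-- interleaving of two equally long lists (A's loop emits one element of each per step)
def PVinterleave : List Int → List Int → List Int
  | [], _ => []
  | a :: as, [] => a :: as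
  | a :: as, b :: bs => a :: b :: PVinterleave as bs

-- A's fold appends constant chunks on each side: it is a pair of flatMaps.
theorem foldl_pair_append (l : List Int) (f g : Int → List Int) (a b : List Int) :
    l.foldl (fun (st : List Int × List Int) i => (st.1 ++ f i, st.2 ++ g i)) (a, b)
      = (a ++ l.flatMap f, b ++ l.flatMap g) := by
  induction l generalizing a b with
  | nil => simp
  | cons x xs ih => simp [List.foldl_cons, ih, List.append_assoc]

-- the indices of range(m) read off the first m elements
theorem map_getD_range (xs : List Int) (m : Nat) (h : m ≤ xs.length) :
    (List.range m).map (fun k => xs.getD k 0) = xs.take m := by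
  apply List.ext_getElem
  · simp [Nat.min_eq_left h]
  · intro i h1 h2
    simp only [List.getElem_map, List.getElem_range, List.getElem_take]
    rw [List.getD_eq_getElem _ _ (by simp at h1; omega)]

-- shifted index loop 'xs[i-1] for i in range(1, n)' is a prefix of xs
theorem map_shift_pyRange (xs : List Int) (n : Int) (m : Nat) (hn : n - 1 = (m : Int))
    (h : m ≤ xs.length) :
    (PySem.List.pyRange 1 n 1).map (fun i => PySem.List.pyGetD xs (i - 1) 0) = xs.take m := by
  rw [PySem.List.pyRange_one, List.map_map]
  have he : (n - 1).toNat = m := by omega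
  rw [he, ← map_getD_range xs m h]
  apply List.map_congr_left
  intro k _
  simp only [Function.comp]
  have : (1 : Int) + (k : Int) - 1 = (k : Int) := by ring
  rw [this, PySem.List.pyGetD_natCast]

theorem flatMap_pair_eq_interleave (l : List Int) (f g : Int → Int) :
    l.flatMap (fun i => [f i, g i]) = PVinterleave (l.map f) (l.map g) := by
  induction l with
  | nil => rfl
  | cons x xs ih => simp [PVinterleave, ih]

theorem flatMap_dup_map (l : List Int) (h : Int → Int) :
    l.flatMap (fun i => [h i, h i]) = (l.map h).flatMap (fun x => [x, x]) := by
  induction l with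
  | nil => rfl
  | cons x xs ih => simp [ih]

theorem interleave_staircase (d : Int) (ds : List Int) :
    PVinterleave ((d :: ds).dropLast) ds ++ [(d :: ds).getLast (by simp)]
      = d :: ds.flatMap (fun x => [x, x]) := by
  induction ds generalizing d with
  | nil => rfl
  | cons e t ih =>
    have hdl : (d :: e :: t).dropLast = d :: (e :: t).dropLast := by simp
    rw [hdl]
    cases t with
    | nil => simp [PVinterleave]
    | cons u v =>
      simp only [PVinterleave, List.dropLast_cons₂, List.cons_append]
      rw [List.getLast_cons (by simp)]
      have := ih e
      simp only [List.dropLast_cons₂, PVinterleave] at this ⊢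
      rw [List.getLast_cons (by simp)] at this
      simpa using this

-- B's even/odd index map over range(2m) duplicates each of the first m elements
theorem range_halved_dup (xs : List Int) (m : Nat) (h : m ≤ xs.length) :
    (List.range (2 * m)).map (fun k => xs.getD (k / 2) 0)
      = (xs.take m).flatMap (fun x => [x, x]) := by
  induction m with
  | zero => simp
  | succ m ih =>
    have h' : m ≤ xs.length := by omega
    have e1 : 2 * (m + 1) = (2 * m) + 1 + 1 := by omega
    rw [e1, List.range_succ, List.range_succ, List.map_append, List.map_append, ih h']
    have hx : m < xs.length := by omega
    have hdiv1 : (2 * m) / 2 = m := by omega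
    have hdiv2 : (2 * m + 1) / 2 = m := by omega
    have htk : xs.take (m + 1) = xs.take m ++ [xs[m]] := by
      rw [List.take_add_one]; simp [List.getElem?_eq_getElem hx]
    rw [htk, List.flatMap_append]
    simp [hdiv1, hdiv2, List.getElem?_eq_getElem hx, List.append_assoc]

-- B's domain map: first element, then every tail element twice
theorem range_shift_halved_dup (d : Int) (ds : List Int) :
    (List.range (2 * ds.length + 1)).map (fun k => (d :: ds).getD ((k + 1) / 2) 0)
      = d :: ds.flatMap (fun x => [x, x]) := by
  rw [List.range_succ_eq_map, List.map_cons, List.map_map]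
  congr 1
  have : ((fun k => (d :: ds).getD ((k + 1) / 2) 0) ∘ Nat.succ)
      = fun k => ds.getD (k / 2) 0 := by
    funext k
    have e : (k + 1 + 1) / 2 = k / 2 + 1 := by omega
    simp [Function.comp, e]
  rw [this, range_halved_dup ds ds.length le_rfl, List.take_length]

-- bridge: B's Int-indexed pyRange map is the corresponding Nat range map
theorem pyRange_map_getD_nat (xs : List Int) (b : Int) (m : Nat) (hb : b = (m : Int))
    (off : Nat) :
    (PySem.List.pyRange 0 b 1).map
        (fun k => PySem.List.pyGetD xs (PySem.Int.floordiv (k + off) 2) 0)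
      = (List.range m).map (fun k => xs.getD ((k + off) / 2) 0) := by
  rw [PySem.List.pyRange_one, List.map_map]
  have he : (b - 0).toNat = m := by omega
  rw [he]
  apply List.map_congr_left
  intro k _
  simp only [Function.comp, zero_add]
  have e1 : ((k : Int) + (off : Int)) = (((k + off : Nat) : Int)) := by push_cast; ring
  rw [e1]
  rw [show PySem.Int.floordiv ((((k + off : Nat)) : Int)) 2 = (((k + off) / 2 : Nat) : Int) from
    PySem.Int.floordiv_natCast _ 2]
  rw [PySem.List.pyGetD_natCast]

-- ===== VERDICT =====
theorem prepare_sample_plot_data_spec : Claim_equal_prepare_sample_plot_data := by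
  intro domain data _ hpre
  obtain ⟨hd, hdat, hlen⟩ := hpre
  obtain ⟨d, ds, rfl⟩ := List.exists_cons_of_ne_nil hd
  unfold Spec_prepare_sample_plot_data prepare_sample_plot_data prepare_sample_plot_data_alt
  rw [foldl_pair_append]
  simp only [List.nil_append]
  have hlen' : ds.length ≤ data.length := by simpa using hlen
  simp only [Prod.mk.injEq]
  constructor
  · -- domain side
    rw [flatMap_pair_eq_interleave,
        map_shift_pyRange (d :: ds) _ ds.length (by simp) (by simp),
        PySem.List.map_pyGetD_pyRange' (d :: ds) 0 (by norm_num : (0:Int) ≤ 1)]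
    rw [PySem.List.pyGetD_neg_one _ _ hd]
    have hb : 2 * ((d :: ds).length : Int) - 1 = ((2 * ds.length + 1 : Nat) : Int) := by
      simp; ring
    have := pyRange_map_getD_nat (d :: ds) (2 * ((d :: ds).length : Int) - 1)
      (2 * ds.length + 1) hb 1
    simp only [Nat.cast_one] at this
    rw [this, range_shift_halved_dup d ds]
    have : (d :: ds).take ds.length = (d :: ds).dropLast := by
      rw [List.dropLast_eq_take]; simp
    rw [this]
    simpa using interleave_staircase d ds
  · -- data side
    rw [flatMap_dup_map,
        map_shift_pyRange data _ ds.length (by simp) hlen']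
    have hb : 2 * ((d :: ds).length : Int) - 2 = ((2 * ds.length : Nat) : Int) := by
      simp; ring
    have hmap := pyRange_map_getD_nat data (2 * ((d :: ds).length : Int) - 2)
      (2 * ds.length) hb 0
    simp only [Int.natCast_zero, add_zero] at hmap
    rw [hmap, range_halved_dup data ds.length hlen']
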